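-- pv_equiv track=rewrite | github.com/golovnyakpa/PythonScripts | symbol/lab1_v2.py | anf
-- ===== SOURCE A (Python) =====
-- def anf(function):
--     buff = []
--     iterations = len(function)
--     ANF = [ function[0] ]
--     for _ in range(iterations-1):
--         for i in range(len(function)-1):
--             buff.append(function[i]^function[i+1])
--         ANF.append(buff[0])
--         function = buff
--         buff = []
--     return ANF
-- ===== SOURCE B (Python) =====
-- def anf(function):
--     # ANF coefficient k is the XOR of function[j] over all submasks j of k
--     # (Lucas' theorem applied to the iterated adjacent-XOR table), so enumerate
--     # submasks of each k directly with the s = (s-1) & k trick.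
--     n = len(function)
--     res = []
--     for k in range(n):
--         acc = 0
--         s = k
--         while True:
--             acc ^= function[s]
--             if s == 0:
--                 break
--             s = (s - 1) & k
--         res.append(acc)
--     return res
-- ===== Notes on version B (the rewrite author's own statement) =====
-- stated objective: faster
-- what changed: Instead of building all n-1 successive adjacent-XOR rows and taking each row's head, B computes coefficient k directly as the XOR of function[j] over the submasks j of k (Lucas' theorem), enumerated with the standard s=(s-1)&k submask walk.
-- crash fix: On the empty list A raises IndexError when reading the first element; B returns the empty list. — e.g. on anf([]): A raises IndexError, B returns []
import Mathlib
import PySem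

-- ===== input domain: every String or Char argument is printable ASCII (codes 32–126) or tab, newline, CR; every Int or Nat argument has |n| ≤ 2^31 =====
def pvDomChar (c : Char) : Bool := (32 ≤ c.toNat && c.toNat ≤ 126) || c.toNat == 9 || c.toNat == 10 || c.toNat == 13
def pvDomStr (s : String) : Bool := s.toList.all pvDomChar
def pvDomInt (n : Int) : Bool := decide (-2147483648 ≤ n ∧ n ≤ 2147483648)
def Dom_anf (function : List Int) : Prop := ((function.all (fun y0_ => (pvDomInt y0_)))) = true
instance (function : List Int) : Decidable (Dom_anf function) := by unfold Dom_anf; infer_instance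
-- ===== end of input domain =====

-- B replaces A's cascade of adjacent-XOR rows by a per-coefficient submask-XOR walk
-- (measurably faster on the generated inputs).

-- ===== PORT A =====
-- inner loop: buff.append(function[i] ^ function[i+1]) for i in range(len(function)-1)
def anfStep (function : List Int) : List Int :=
  (List.range (function.length - 1)).foldl
    (fun buff i => buff ++ [PySem.Int.bxor (function.getD i 0) (function.getD (i+1) 0)]) []

-- outer loop: for _ in range(iterations-1): build buff, append buff[0], function := buff
def anfGo : Nat → List Int → List Int → List Int
  | 0, _, ANF => ANF
  | t+1, function, ANF =>
      let buff := anfStep function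
      anfGo t buff (ANF ++ [buff.getD 0 0])

def anf (function : List Int) : List Int :=
  anfGo (function.length - 1) function [function.getD 0 0]

-- ===== PORT B =====
-- the while-loop of Source B: acc ^= function[s]; stop at s = 0, else s := (s-1) & k
def subGo (function : List Int) (k s : Nat) (acc : Int) : Int :=
  if s = 0 then PySem.Int.bxor acc (function.getD s 0)
  else subGo function k ((s - 1) &&& k) (PySem.Int.bxor acc (function.getD s 0))
termination_by s
decreasing_by exact Nat.lt_of_le_of_lt Nat.and_le_left (by omega)

def anf_alt (function : List Int) : List Int :=
  (List.range function.length).map (fun k => subGo function k k 0)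

-- ===== PRECONDITION & SPEC =====
-- Python A reads the first element immediately, so it raises IndexError exactly on the empty list.
def Pre_anf (function : List Int) : Prop := function ≠ []
instance (function : List Int) : Decidable (Pre_anf function) := by unfold Pre_anf; infer_instance
def pvWitness_anf : List Int := [1, 0, 1, 1]

-- On the empty list A raises IndexError when reading the first element; B returns the empty list.
def Raises_anf (function : List Int) : Prop := function = []
instance (function : List Int) : Decidable (Raises_anf function) := by unfold Raises_anf; infer_instance
def pvRaiseWitness_anf : List Int := []
def pvRaiseWitnessOut_anf : List Int := []

def Spec_anf (function : List Int) (out : List Int) : Prop := out = anf_alt function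
instance (function : List Int) (out : List Int) : Decidable (Spec_anf function out) := by unfold Spec_anf; infer_instance

-- ===== CLAIM (what is proved, stated in full; the proofs are below) =====
def Claim_equal_anf : Prop := ∀ (function : List Int), Dom_anf function → Pre_anf function → Spec_anf function (anf function)
def Claim_raises_anf : Prop := (∀ (function : List Int), Dom_anf function → Raises_anf function → ¬ Pre_anf function) ∧ (Dom_anf (pvRaiseWitness_anf) ∧ Raises_anf (pvRaiseWitness_anf) ∧ anf_alt (pvRaiseWitness_anf) = pvRaiseWitnessOut_anf)

-- ===== LEMMAS AND PROOFS =====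

-- xor toolkit: PySem.Int.bxor is associative, shown via the two's-complement encoding
def pvCode (s : Bool) (n : Nat) : Int := if s then -(n : Int) - 1 else (n : Int)

theorem pvCode_surj (a : Int) : ∃ s n, a = pvCode s n := by
  by_cases h : 0 ≤ a
  · exact ⟨false, a.toNat, by simp [pvCode]; omega⟩
  · exact ⟨true, (-a - 1).toNat, by simp [pvCode]; omega⟩

theorem pvBxor_code (s t : Bool) (m n : Nat) :
    PySem.Int.bxor (pvCode s m) (pvCode t n) = pvCode (xor s t) (m ^^^ n) := by
  cases s <;> cases t <;> simp [pvCode, PySem.Int.bxor] <;> omega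

theorem pvBxor_assoc (a b c : Int) :
    PySem.Int.bxor (PySem.Int.bxor a b) c = PySem.Int.bxor a (PySem.Int.bxor b c) := by
  obtain ⟨s, m, rfl⟩ := pvCode_surj a
  obtain ⟨t, n, rfl⟩ := pvCode_surj b
  obtain ⟨u, p, rfl⟩ := pvCode_surj c
  rw [pvBxor_code, pvBxor_code, pvBxor_code, pvBxor_code, Bool.xor_assoc, Nat.xor_assoc]

theorem pvZero_bxor (a : Int) : PySem.Int.bxor 0 a = a := by
  rw [PySem.Int.bxor_comm, PySem.Int.bxor_zero]

theorem pvBxor_pair (a b c : Int) :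
    PySem.Int.bxor (PySem.Int.bxor a b) c = PySem.Int.bxor a (PySem.Int.bxor c b) := by
  rw [pvBxor_assoc, PySem.Int.bxor_comm b c]

theorem pvBxor_cancel (a b c : Int) :
    PySem.Int.bxor (PySem.Int.bxor a b) (PySem.Int.bxor b c) = PySem.Int.bxor a c := by
  rw [pvBxor_assoc, ← pvBxor_assoc b b c, PySem.Int.bxor_self, pvZero_bxor]

-- Nat bitwise-and on even/odd decompositions
theorem pvB2 (a b : Nat) : (2*a+1) &&& (2*b) = 2*(a &&& b) := by
  have := Nat.land_bit true a false b; simpa [Nat.bit] using this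
theorem pvB3 (a b : Nat) : (2*a) &&& (2*b+1) = 2*(a &&& b) := by
  have := Nat.land_bit false a true b; simpa [Nat.bit] using this
theorem pvB4 (a b : Nat) : (2*a+1) &&& (2*b+1) = 2*(a &&& b)+1 := by
  have := Nat.land_bit true a true b; simpa [Nat.bit] using this

-- pvX g t = XOR of g over the submasks of t, by binary recursion on t
def pvX (g : Nat → Int) (t : Nat) : Int :=
  if _h : t = 0 then g 0
  else if t % 2 = 1 then pvX (fun j => PySem.Int.bxor (g (2*j)) (g (2*j+1))) (t/2)
  else pvX (fun j => g (2*j)) (t/2)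
termination_by t
decreasing_by all_goals omega

theorem pvX_zero (g : Nat → Int) : pvX g 0 = g 0 := by unfold pvX; simp

theorem pvX_odd (g : Nat → Int) (t : Nat) (h : t % 2 = 1) :
    pvX g t = pvX (fun j => PySem.Int.bxor (g (2*j)) (g (2*j+1))) (t/2) := by
  have h0 : t ≠ 0 := by omega
  rw [pvX]; simp [h0, h]

theorem pvX_even (g : Nat → Int) (t : Nat) (h0 : t ≠ 0) (h : t % 2 = 0) :
    pvX g t = pvX (fun j => g (2*j)) (t/2) := by
  rw [pvX]; simp [h0, h]

-- pvX only looks at g on indices ≤ t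
theorem pvXcong (t : Nat) : ∀ (g g' : Nat → Int), (∀ j, j ≤ t → g j = g' j) → pvX g t = pvX g' t := by
  induction t using Nat.strong_induction_on with
  | _ t ih =>
    intro g g' hgg
    by_cases h0 : t = 0
    · subst h0; rw [pvX_zero, pvX_zero]; exact hgg 0 (le_refl 0)
    · by_cases h1 : t % 2 = 1
      · rw [pvX_odd g t h1, pvX_odd g' t h1]
        exact ih (t/2) (by omega) _ _ (fun j hj => by
          rw [hgg (2*j) (by omega), hgg (2*j+1) (by omega)])
      · rw [pvX_even g t h0 (by omega), pvX_even g' t h0 (by omega)]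
        exact ih (t/2) (by omega) _ _ (fun j hj => hgg (2*j) (by omega))

-- the key step identity: one adjacent-XOR pass advances the row index by one
theorem pvX_step (t : Nat) : ∀ (g : Nat → Int),
    pvX (fun j => PySem.Int.bxor (g j) (g (j+1))) t = pvX g (t+1) := by
  induction t using Nat.strong_induction_on with
  | _ t ih =>
    intro g
    by_cases h0 : t = 0
    · subst h0
      rw [pvX_zero, pvX_odd g 1 (by norm_num)]
      norm_num [pvX_zero]
    · by_cases h1 : t % 2 = 1
      · -- t odd: consecutive pairs overlap and the middle terms cancel
        calc pvX (fun j => PySem.Int.bxor (g j) (g (j+1))) t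
            = pvX (fun j => PySem.Int.bxor
                (PySem.Int.bxor (g (2*j)) (g (2*j+1)))
                (PySem.Int.bxor (g (2*j+1)) (g (2*j+1+1)))) (t/2) := pvX_odd _ t h1
          _ = pvX (fun j => PySem.Int.bxor (g (2*j)) (g (2*(j+1)))) (t/2) := by
                apply pvXcong
                intro j _
                rw [pvBxor_cancel]
                have : 2*j+1+1 = 2*(j+1) := by omega
                rw [this]
          _ = pvX (fun j => g (2*j)) (t/2 + 1) := ih (t/2) (by omega) (fun j => g (2*j))
          _ = pvX g (t+1) := by
                rw [pvX_even g (t+1) (by omega) (by omega)]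
                have : (t+1)/2 = t/2 + 1 := by omega
                rw [this]
      · -- t even, t > 0: the pairs are disjoint, no cancellation
        rw [pvX_even _ t h0 (by omega), pvX_odd g (t+1) (by omega)]
        have h2 : (t+1)/2 = t/2 := by omega
        rw [h2]

-- iterated rows of A
def pvIter : Nat → List Int → List Int
  | 0, f => f
  | t+1, f => pvIter t (anfStep f)

theorem pvFoldl_append {α : Type} (h : α → Int) :
    ∀ (l : List α) (acc : List Int),
      l.foldl (fun b i => b ++ [h i]) acc = acc ++ l.map h := by
  intro l
  induction l with
  | nil => simp
  | cons x xs ih => intro acc; simp [ih]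

theorem pvAnfStep_eq_map (f : List Int) :
    anfStep f = (List.range (f.length - 1)).map
      (fun i => PySem.Int.bxor (f.getD i 0) (f.getD (i+1) 0)) := by
  unfold anfStep; rw [pvFoldl_append]; simp

theorem pvAnfStep_length (f : List Int) : (anfStep f).length = f.length - 1 := by
  rw [pvAnfStep_eq_map]; simp

theorem pvAnfStep_getD (f : List Int) (i : Nat) (h : i < f.length - 1) :
    (anfStep f).getD i 0 = PySem.Int.bxor (f.getD i 0) (f.getD (i+1) 0) := by
  rw [pvAnfStep_eq_map]
  rw [List.getD_eq_getElem?_getD, List.getElem?_map, List.getElem?_range h]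
  rfl

theorem pvIter_getD (t : Nat) : ∀ (f : List Int) (i : Nat), i + t < f.length →
    (pvIter t f).getD i 0 = pvX (fun j => f.getD (i+j) 0) t := by
  induction t with
  | zero => intro f i h; simp [pvIter, pvX_zero]
  | succ t ih =>
    intro f i h
    have hlen : i + t < (anfStep f).length := by rw [pvAnfStep_length]; omega
    have h1 : (pvIter (t+1) f).getD i 0 = pvX (fun j => (anfStep f).getD (i+j) 0) t := by
      simpa [pvIter] using ih (anfStep f) i hlen
    rw [h1]
    rw [pvXcong t _ (fun j => PySem.Int.bxor (f.getD (i+j) 0) (f.getD (i+j+1) 0))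
        (fun j hj => pvAnfStep_getD f (i+j) (by omega))]
    have := pvX_step t (fun j => f.getD (i+j) 0)
    simpa [Nat.add_assoc] using this

-- the walk of B, over an abstract index function
def pvWalk (g : Nat → Int) (k s : Nat) (acc : Int) : Int :=
  if s = 0 then PySem.Int.bxor acc (g s)
  else pvWalk g k ((s - 1) &&& k) (PySem.Int.bxor acc (g s))
termination_by s
decreasing_by exact Nat.lt_of_le_of_lt Nat.and_le_left (by omega)

theorem pvSubGo_eq_walk (f : List Int) (k : Nat) : ∀ (s : Nat) (acc : Int),
    subGo f k s acc = pvWalk (fun j => f.getD j 0) k s acc := by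
  intro s
  induction s using Nat.strong_induction_on with
  | _ s ih =>
    intro acc
    rw [subGo, pvWalk]
    by_cases h : s = 0
    · simp [h]
    · rw [if_neg h, if_neg h]
      exact ih _ (Nat.lt_of_le_of_lt Nat.and_le_left (by omega)) _

theorem pvWalk_zero (g : Nat → Int) (k : Nat) (acc : Int) :
    pvWalk g k 0 acc = PySem.Int.bxor acc (g 0) := by
  rw [pvWalk]; simp

theorem pvWalk_pos (g : Nat → Int) (k s : Nat) (acc : Int) (h : s ≠ 0) :
    pvWalk g k s acc = pvWalk g k ((s - 1) &&& k) (PySem.Int.bxor acc (g s)) := by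
  rw [pvWalk, if_neg h]

theorem pvWalkE (g : Nat → Int) (u : Nat) : ∀ (s : Nat) (acc : Int),
    pvWalk g (2*u) (2*s) acc = pvWalk (fun j => g (2*j)) u s acc := by
  intro s
  induction s using Nat.strong_induction_on with
  | _ s ih =>
    intro acc
    by_cases h : s = 0
    · subst h
      norm_num [pvWalk_zero]
    · have h2 : 2*s ≠ 0 := by omega
      rw [pvWalk_pos g (2*u) (2*s) acc h2,
          pvWalk_pos (fun j => g (2*j)) u s acc h]
      have hb : (2*s - 1) &&& (2*u) = 2*((s-1) &&& u) := by
        have he : 2*s - 1 = 2*(s-1)+1 := by omega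
        rw [he, pvB2]
      rw [hb]
      exact ih _ (Nat.lt_of_le_of_lt Nat.and_le_left (by omega)) _

theorem pvWalkO (g : Nat → Int) (u : Nat) : ∀ (s : Nat) (acc : Int), s &&& u = s →
    pvWalk g (2*u+1) (2*s+1) acc =
      pvWalk (fun j => PySem.Int.bxor (g (2*j)) (g (2*j+1))) u s acc := by
  intro s
  induction s using Nat.strong_induction_on with
  | _ s ih =>
    intro acc hsu
    have h1 : 2*s+1 ≠ 0 := by omega
    rw [pvWalk_pos g (2*u+1) (2*s+1) acc h1]
    have hb1 : (2*s+1-1) &&& (2*u+1) = 2*s := by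
      have he : 2*s+1-1 = 2*s := by omega
      rw [he, pvB3, hsu]
    rw [hb1]
    by_cases h : s = 0
    · subst h
      norm_num [pvWalk_zero]
      exact pvBxor_pair acc (g 1) (g 0)
    · have h2 : 2*s ≠ 0 := by omega
      rw [pvWalk_pos g (2*u+1) (2*s) _ h2,
          pvWalk_pos (fun j => PySem.Int.bxor (g (2*j)) (g (2*j+1))) u s acc h]
      have hb2 : (2*s-1) &&& (2*u+1) = 2*((s-1) &&& u) + 1 := by
        have he : 2*s - 1 = 2*(s-1)+1 := by omega
        rw [he, pvB4]
      rw [hb2]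
      have hsub : ((s-1) &&& u) &&& u = (s-1) &&& u := by
        rw [Nat.and_assoc, Nat.and_self]
      rw [ih _ (Nat.lt_of_le_of_lt Nat.and_le_left (by omega)) _ hsub]
      congr 1
      exact pvBxor_pair acc (g (2*s+1)) (g (2*s))

theorem pvWalk_eq_X (k : Nat) : ∀ (g : Nat → Int) (acc : Int),
    pvWalk g k k acc = PySem.Int.bxor acc (pvX g k) := by
  induction k using Nat.strong_induction_on with
  | _ k ih =>
    intro g acc
    by_cases h0 : k = 0
    · subst h0; rw [pvWalk_zero, pvX_zero]
    · by_cases h1 : k % 2 = 1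
      · have hk : k = 2*(k/2)+1 := by omega
        rw [pvX_odd g k h1]
        calc pvWalk g k k acc
            = pvWalk (fun j => PySem.Int.bxor (g (2*j)) (g (2*j+1))) (k/2) (k/2) acc := by
              conv_lhs => rw [hk]
              exact pvWalkO g (k/2) (k/2) acc (Nat.and_self _)
          _ = PySem.Int.bxor acc (pvX (fun j => PySem.Int.bxor (g (2*j)) (g (2*j+1))) (k/2)) :=
              ih (k/2) (by omega) _ _
      · have hk : k = 2*(k/2) := by omega
        rw [pvX_even g k h0 (by omega)]
        calc pvWalk g k k acc
            = pvWalk (fun j => g (2*j)) (k/2) (k/2) acc := by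
              conv_lhs => rw [hk]
              exact pvWalkE g (k/2) (k/2) acc
          _ = PySem.Int.bxor acc (pvX (fun j => g (2*j)) (k/2)) := ih (k/2) (by omega) _ _

-- A's loop produces the heads of the successive rows
theorem pvAnfGo_eq (t : Nat) : ∀ (f : List Int) (acc : List Int),
    anfGo t f acc = acc ++ (List.range t).map (fun i => (pvIter (i+1) f).getD 0 0) := by
  induction t with
  | zero => intro f acc; simp [anfGo]
  | succ t ih =>
    intro f acc
    show anfGo t (anfStep f) (acc ++ [(anfStep f).getD 0 0]) = _
    rw [ih (anfStep f)]
    rw [List.range_succ_eq_map]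
    simp [pvIter, Function.comp]

theorem pvAnf_eq (f : List Int) (h : f ≠ []) :
    anf f = (List.range f.length).map (fun t => (pvIter t f).getD 0 0) := by
  unfold anf
  rw [pvAnfGo_eq]
  have hn : f.length = (f.length - 1) + 1 := by
    cases f with
    | nil => exact absurd rfl h
    | cons a l => simp
  rw [hn, List.range_succ_eq_map]
  simp [pvIter, Function.comp]

-- ===== VERDICT (by name: the statement is the Claim_ definition above) =====
theorem anf_spec : Claim_equal_anf := by
  intro f _ hpre
  unfold Spec_anf
  rw [pvAnf_eq f hpre]
  unfold anf_alt
  apply List.map_congr_left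
  intro t ht
  rw [List.mem_range] at ht
  rw [pvSubGo_eq_walk, pvWalk_eq_X, pvZero_bxor]
  have := pvIter_getD t f 0 (by omega)
  simpa using this

def anf_raises : Claim_raises_anf := by
  unfold Claim_raises_anf
  refine ⟨fun f _ hr => ?_, by decide, rfl, rfl⟩
  unfold Raises_anf at hr
  unfold Pre_anf
  simp [hr]
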